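-- pv_equiv track=rewrite | github.com/uygnoey/anthropic-official-skills | scripts/sync_readme_index.py | replace_post_rows
-- ===== SOURCE A (Python) =====
-- HEADER_MARKERS = [
--     ("Blog post", "Published", "Artifacts"),   # en
--     ("블로그 글", "게시일", "아티팩트"),            # ko
--     ("Post", "Publicado", "Artefactos"),        # es
--     ("ブログ記事", "公開日", "成果物"),           # ja
-- ]
--
-- def _is_index_header(line: str) -> bool:
--     s = line.strip()
--     if not s.startswith("|"):
--         return False
--     for a, b, c in HEADER_MARKERS:
--         if a in s and b in s and c in s:
--             return True
--     return False
--
-- def replace_post_rows(md_text: str, new_rows: list[str]) -> str: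
--     lines = md_text.splitlines()
--     out = []
--     i = 0
--     n = len(lines)
--     replaced = False
--     while i < n:
--         line = lines[i]
--         out.append(line)
--         if not replaced and _is_index_header(line):
--             # keep divider line next
--             if i + 1 < n and lines[i+1].strip().startswith("|---"):
--                 out.append(lines[i+1])
--                 i += 2
--             else:
--                 i += 1
--             # skip existing post rows
--             while i < n and lines[i].strip().startswith("| ["):
--                 i += 1
--             # insert new rows
--             out.extend(new_rows)
--             replaced = True
--             continue
--         i += 1
--     return "\n".join(out) + ("\n" if md_text.endswith("\n") else "")
-- ===== SOURCE B (Python) =====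
-- HEADER_MARKERS = [
--     ("Blog post", "Published", "Artifacts"),   # en
--     ("블로그 글", "게시일", "아티팩트"),            # ko
--     ("Post", "Publicado", "Artefactos"),        # es
--     ("ブログ記事", "公開日", "成果物"),           # ja
-- ]
--
-- def _is_index_header(line: str) -> bool:
--     s = line.strip()
--     if not s.startswith("|"):
--         return False
--     for a, b, c in HEADER_MARKERS:
--         if a in s and b in s and c in s:
--             return True
--     return False
--
-- def replace_post_rows(md_text: str, new_rows: list[str]) -> str:
--     lines = md_text.splitlines()
--     nl = "\n" if md_text.endswith("\n") else ""
--     h = next((i for i, l in enumerate(lines) if _is_index_header(l)), None)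
--     if h is None:
--         return "\n".join(lines) + nl
--     j = h + 1
--     keep_div = j < len(lines) and lines[j].strip().startswith("|---")
--     if keep_div:
--         j += 1
--     k = j
--     while k < len(lines) and lines[k].strip().startswith("| ["):
--         k += 1
--     out = lines[:h + 1] + lines[h + 1:j] + new_rows + lines[k:]
--     return "\n".join(out) + nl
-- ===== Notes on version B (the rewrite author's own statement) =====
-- stated objective: simpler
-- what changed: Replaces A's stateful while-loop with append/replaced-flag/continue bookkeeping by a find-then-splice decomposition: locate the first index-header line, conditionally keep the divider, skip the old post rows, and build the result by slice concatenation.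
import Mathlib
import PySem

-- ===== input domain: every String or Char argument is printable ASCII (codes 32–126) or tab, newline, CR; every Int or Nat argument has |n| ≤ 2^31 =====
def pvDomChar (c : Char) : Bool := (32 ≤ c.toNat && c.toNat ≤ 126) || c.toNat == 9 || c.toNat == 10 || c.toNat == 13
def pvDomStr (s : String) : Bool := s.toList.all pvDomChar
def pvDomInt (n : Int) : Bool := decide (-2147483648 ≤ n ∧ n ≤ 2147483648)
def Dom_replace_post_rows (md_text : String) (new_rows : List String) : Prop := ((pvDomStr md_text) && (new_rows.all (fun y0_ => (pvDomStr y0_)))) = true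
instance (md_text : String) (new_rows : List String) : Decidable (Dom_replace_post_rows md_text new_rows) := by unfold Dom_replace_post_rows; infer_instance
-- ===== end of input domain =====

-- B replaces A's stateful append-and-flag while-loop by a find-then-splice decomposition
-- (locate the first header, then build the result by slice concatenation); objective: simpler.

-- ===== PORT A =====
-- shared module-level constant and helper (used verbatim by both Pythons)
def HEADER_MARKERS : List (String × String × String) :=
  [("Blog post", "Published", "Artifacts"),
   ("블로그 글", "게시일", "아티팩트"),
   ("Post", "Publicado", "Artefactos"),
   ("ブログ記事", "公開日", "成果物")]

def is_index_header (line : String) : Bool :=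
  let s := PySem.Str.strip line
  if !(PySem.Str.startswith s "|") then false
  else HEADER_MARKERS.any (fun m =>
    PySem.Str.isIn m.1 s && PySem.Str.isIn m.2.1 s && PySem.Str.isIn m.2.2 s)

-- the inner "while i < n and lines[i].strip().startswith('| ['): i += 1" of A
def skipPostRows : List String → List String
  | [] => []
  | l :: tl =>
    if PySem.Str.startswith (PySem.Str.strip l) "| [" then skipPostRows tl else l :: tl

theorem skipPostRows_length_le : ∀ (xs : List String), (skipPostRows xs).length ≤ xs.length
  | [] => le_refl _
  | l :: tl => by
    unfold skipPostRows
    split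
    · exact le_trans (skipPostRows_length_le tl) (Nat.le_succ _)
    · exact le_refl _

-- A's main while-loop, as structural recursion on the remaining lines plus the `replaced` flag
def loopA (new_rows : List String) : List String → Bool → List String
  | [], _ => []
  | line :: tl, replaced =>
    if !replaced && is_index_header line then
      match tl with
      | d :: tl' =>
        if PySem.Str.startswith (PySem.Str.strip d) "|---" then
          line :: d :: (new_rows ++ loopA new_rows (skipPostRows tl') true)
        else
          line :: (new_rows ++ loopA new_rows (skipPostRows (d :: tl')) true)
      | [] => line :: (new_rows ++ loopA new_rows (skipPostRows []) true)
    else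
      line :: loopA new_rows tl replaced
termination_by rest _ => rest.length
decreasing_by
  all_goals first
    | exact Nat.lt_succ_of_le (le_trans (skipPostRows_length_le _) (Nat.le_succ _))
    | exact Nat.lt_succ_of_le (skipPostRows_length_le _)
    | simp [skipPostRows]

def replace_post_rows (md_text : String) (new_rows : List String) : String :=
  let lines := PySem.Str.splitlines md_text
  PySem.Str.join "\n" (loopA new_rows lines false) ++
    (if PySem.Str.endswith md_text "\n" then "\n" else "")

-- ===== PORT B =====
def replace_post_rows_alt (md_text : String) (new_rows : List String) : String :=
  let lines := PySem.Str.splitlines md_text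
  let nl := if PySem.Str.endswith md_text "\n" then "\n" else ""
  match lines.findIdx? is_index_header with
  | none => PySem.Str.join "\n" lines ++ nl
  | some h =>
    let keep_div : Bool :=
      match lines[h+1]? with
      | some d => PySem.Str.startswith (PySem.Str.strip d) "|---"
      | none => false
    let j := cond keep_div (h + 2) (h + 1)
    let k := j + ((lines.drop j).takeWhile
        (fun l => PySem.Str.startswith (PySem.Str.strip l) "| [")).length
    PySem.Str.join "\n"
      (lines.take (h+1) ++ (lines.drop (h+1)).take (j - (h+1)) ++ new_rows ++ lines.drop k) ++ nl

-- ===== PRECONDITION & SPEC =====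
def Spec_replace_post_rows (md_text : String) (new_rows : List String) (out : String) : Prop := out = replace_post_rows_alt md_text new_rows
instance (md_text : String) (new_rows : List String) (out : String) : Decidable (Spec_replace_post_rows md_text new_rows out) := by unfold Spec_replace_post_rows; infer_instance

-- ===== CLAIM (what is proved, stated in full; the proofs are below) =====
def Claim_equal_replace_post_rows : Prop := ∀ (md_text : String) (new_rows : List String), Dom_replace_post_rows md_text new_rows → Spec_replace_post_rows md_text new_rows (replace_post_rows md_text new_rows)

-- ===== LEMMAS AND PROOFS =====

theorem drop_one_add {α : Type} (m : Nat) (a : α) (l : List α) :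
    List.drop (1 + m) (a :: l) = List.drop m l := by rw [Nat.add_comm]; rfl

theorem drop_two_add {α : Type} (m : Nat) (a b : α) (l : List α) :
    List.drop (2 + m) (a :: b :: l) = List.drop m l := by rw [Nat.add_comm]; rfl

theorem loopA_true (rows : List String) : ∀ (tl : List String), loopA rows tl true = tl := by
  intro tl
  induction tl with
  | nil => rw [loopA]
  | cons l tl ih => rw [loopA.eq_def]; simp [ih]

theorem skipPostRows_eq_dropWhile : ∀ (xs : List String),
    skipPostRows xs = xs.dropWhile (fun l => PySem.Str.startswith (PySem.Str.strip l) "| [") := by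
  intro xs
  induction xs with
  | nil => rfl
  | cons l tl ih =>
    unfold skipPostRows
    rw [List.dropWhile_cons]
    split <;> simp_all

theorem drop_takeWhile_length {α : Type} (p : α → Bool) : ∀ (l : List α),
    l.drop (l.takeWhile p).length = l.dropWhile p := by
  intro l
  induction l with
  | nil => rfl
  | cons a l ih =>
    by_cases h : p a
    · simp [List.takeWhile_cons, List.dropWhile_cons, h, ih]
    · simp [List.takeWhile_cons, List.dropWhile_cons, h]

theorem loopA_eq_splice (rows : List String) : ∀ (lines : List String),
    loopA rows lines false =
      (match lines.findIdx? is_index_header with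
       | none => lines
       | some h =>
         let keep_div : Bool :=
           match lines[h+1]? with
           | some d => PySem.Str.startswith (PySem.Str.strip d) "|---"
           | none => false
         let j := cond keep_div (h + 2) (h + 1)
         let k := j + ((lines.drop j).takeWhile
             (fun l => PySem.Str.startswith (PySem.Str.strip l) "| [")).length
         lines.take (h+1) ++ (lines.drop (h+1)).take (j - (h+1)) ++ rows ++ lines.drop k) := by
  intro lines
  induction lines with
  | nil => rw [loopA]; rfl
  | cons line tl ih =>
    by_cases hh : is_index_header line
    · -- header found at position 0
      rw [List.findIdx?_cons]
      simp only [hh, if_pos, ite_true]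
      cases tl with
      | nil =>
        simp [loopA, hh, skipPostRows]
      | cons d tl' =>
        by_cases hd : PySem.Str.startswith (PySem.Str.strip d) "|---"
        · have hd' : PySem.Chars.startswith (PySem.Chars.strip d.toList) ['|','-','-','-'] = true := by
            simpa using hd
          simp only [loopA, hh, hd, Bool.not_false, Bool.true_and, if_true,
            loopA_true, skipPostRows_eq_dropWhile]
          simp [hd', ← drop_takeWhile_length, drop_two_add]
        · have hd' : PySem.Chars.startswith (PySem.Chars.strip d.toList) ['|','-','-','-'] = false := by
            simpa using hd
          simp only [loopA, hh, hd, Bool.not_false, Bool.true_and, if_true, if_false,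
            loopA_true, skipPostRows_eq_dropWhile]
          simp [hd', ← drop_takeWhile_length, drop_one_add]
    · -- not a header: both sides keep `line` and recurse/shift
      have hA : loopA rows (line :: tl) false = line :: loopA rows tl false := by
        rw [loopA.eq_def]; simp [hh]
      rw [hA, ih, List.findIdx?_cons]
      simp only [hh, if_neg, Bool.false_eq_true, not_false_iff, ite_false]
      cases hfi : tl.findIdx? is_index_header with
      | none => rfl
      | some h' =>
        simp only [Option.map_some]
        simp only [List.getElem?_cons_succ, List.drop_succ_cons, List.take_succ_cons]
        generalize (match tl[h' + 1]? with
          | some d => PySem.Str.startswith (PySem.Str.strip d) "|---"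
          | none => false) = c
        cases c
        · simp [List.drop_succ_cons, Nat.succ_sub_succ]
          generalize (List.takeWhile (fun l => PySem.Chars.startswith (PySem.Chars.strip l.toList) ['|', ' ', '[']) (List.drop (h' + 1) tl)).length = x
          rw [show h' + 1 + 1 + x = h' + 1 + x + 1 from by omega]
          rfl
        · simp [List.drop_succ_cons, Nat.succ_sub_succ]
          generalize (List.takeWhile (fun l => PySem.Chars.startswith (PySem.Chars.strip l.toList) ['|', ' ', '[']) (List.drop (h' + 2) tl)).length = x
          rw [show h' + 1 + 2 + x = h' + 2 + x + 1 from by omega]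
          rfl

theorem replace_post_rows_spec : Claim_equal_replace_post_rows := by
  intro md rows _
  unfold Spec_replace_post_rows replace_post_rows replace_post_rows_alt
  simp only [loopA_eq_splice]
  cases List.findIdx? is_index_header (PySem.Str.splitlines md) <;> rfl
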